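-- pv_equiv track=rewrite | github.com/MMVonnSeek/Port-Scanner | scanner.py | parse_intervalos
-- ===== SOURCE A (Python) =====
-- from typing import Iterable, List, Set
--
-- def parse_intervalos(spec: str) -> List[int]:
--     """
--     Aceita formatos como:
--       '80,443,8080'  |  '20-25'  |  '22,80,8000-8100'
--     """
--     portas: Set[int] = set()
--     for parte in spec.split(","):
--         parte = parte.strip()
--         if not parte:
--             continue
--         if "-" in parte:
--             a, b = parte.split("-", 1)
--             ini, fim = int(a), int(b)
--             if ini > fim:
--                 ini, fim = fim, ini
--             for p in range(max(1, ini), min(65535, fim) + 1):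
--                 portas.add(p)
--         else:
--             p = int(parte)
--             if 1 <= p <= 65535:
--                 portas.add(p)
--     return sorted(portas)
-- ===== SOURCE B (Python) =====
-- def parse_intervalos(spec: str):
--     # Interval-merge algorithm: collect clamped (lo, hi) intervals, sort them by
--     # start, then sweep once merging overlapping/adjacent runs and emitting each
--     # finished run directly -- no per-port set and no sort of individual ports.
--     intervals = []
--     for parte in spec.split(","):
--         parte = parte.strip()
--         if not parte:
--             continue
--         if "-" in parte:
--             a, b = parte.split("-", 1)
--             ini, fim = int(a), int(b)
--             if ini > fim:
--                 ini, fim = fim, ini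
--             lo, hi = max(1, ini), min(65535, fim)
--             if lo <= hi:
--                 intervals.append((lo, hi))
--         else:
--             p = int(parte)
--             if 1 <= p <= 65535:
--                 intervals.append((p, p))
--     intervals.sort(key=lambda iv: iv[0])
--     result = []
--     cur = None
--     for lo, hi in intervals:
--         if cur is None:
--             cur = (lo, hi)
--         elif lo <= cur[1] + 1:
--             if hi > cur[1]:
--                 cur = (cur[0], hi)
--         else:
--             result.extend(range(cur[0], cur[1] + 1))
--             cur = (lo, hi)
--     if cur is not None:
--         result.extend(range(cur[0], cur[1] + 1))
--     return result
-- ===== Notes on version B (the rewrite author's own statement) =====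
-- stated objective: alternative
-- what changed: B parses each comma piece into a clamped (lo,hi) interval (never touching individual ports), sorts the few intervals by their start, and emits the result in one sweep that merges overlapping/adjacent intervals and extends each finished run directly into the output, replacing A's per-port set insertion plus comparison sort of all ports; Pre_ excludes only specs on which int() raises ValueError in A (B raises there too).
import Mathlib
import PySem

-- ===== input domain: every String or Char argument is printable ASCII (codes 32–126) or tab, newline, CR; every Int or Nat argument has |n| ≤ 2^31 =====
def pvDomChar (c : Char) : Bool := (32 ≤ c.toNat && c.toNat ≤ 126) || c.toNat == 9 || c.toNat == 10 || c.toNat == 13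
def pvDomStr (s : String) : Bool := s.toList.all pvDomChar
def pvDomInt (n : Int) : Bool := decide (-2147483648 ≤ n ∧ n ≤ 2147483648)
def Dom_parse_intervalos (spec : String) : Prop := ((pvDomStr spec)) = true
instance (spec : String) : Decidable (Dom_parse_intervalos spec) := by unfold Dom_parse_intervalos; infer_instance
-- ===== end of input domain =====

-- B parses the spec into clamped (lo,hi) intervals, sorts them by start and emits the ports in one
-- merge sweep, instead of A's per-port set insertion plus comparison sort; equal on Pre_ (no ValueError).

-- ===== PORT A =====
-- one iteration of A's parsing loop; none = the int() call raises ValueError (excluded by Pre_)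
def pvStepA (portas : PySem.Set Int) (parte0 : String) : Option (PySem.Set Int) :=
  if PySem.Str.strip parte0 = "" then some portas
  else if PySem.Str.isIn "-" (PySem.Str.strip parte0) then
    match PySem.Str.splitMax? (PySem.Str.strip parte0) "-" 1 with
    | some [a, b] =>
      match PySem.Int.ofStr? a, PySem.Int.ofStr? b with
      | some ini0, some fim0 =>
        let ini := if ini0 > fim0 then fim0 else ini0
        let fim := if ini0 > fim0 then ini0 else fim0
        some ((PySem.List.pyRange (max 1 ini) (min 65535 fim + 1) 1).foldl PySem.Set.add portas)
      | _, _ => none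
    | _ => none  -- unreachable: '-' ∈ parte gives exactly two pieces
  else
    match PySem.Int.ofStr? (PySem.Str.strip parte0) with
    | some p => some (if 1 ≤ p ∧ p ≤ 65535 then PySem.Set.add portas p else portas)
    | none => none

def parse_intervalos (spec : String) : List Int :=
  -- spec.split(",") with sep "," ≠ "": split? is always some
  match ((PySem.Str.split? spec ",").getD []).foldl
      (fun st parte => st.bind fun s => pvStepA s parte) (some PySem.Set.empty) with
  | some portas => PySem.List.sorted portas (fun x => x) false
  | none => []  -- Python raises ValueError here; such specs are outside Pre_

-- ===== PORT B =====
-- one iteration of B's first loop: collect clamped intervals; none = int() raises ValueError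
def pvStepB (ivs : List (Int × Int)) (parte0 : String) : Option (List (Int × Int)) :=
  if PySem.Str.strip parte0 = "" then some ivs
  else if PySem.Str.isIn "-" (PySem.Str.strip parte0) then
    match PySem.Str.splitMax? (PySem.Str.strip parte0) "-" 1 with
    | some [a, b] =>
      match PySem.Int.ofStr? a, PySem.Int.ofStr? b with
      | some ini0, some fim0 =>
        let ini := if ini0 > fim0 then fim0 else ini0
        let fim := if ini0 > fim0 then ini0 else fim0
        some (if max 1 ini ≤ min 65535 fim then ivs ++ [(max 1 ini, min 65535 fim)] else ivs)
      | _, _ => none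
    | _ => none
  else
    match PySem.Int.ofStr? (PySem.Str.strip parte0) with
    | some p => some (if 1 ≤ p ∧ p ≤ 65535 then ivs ++ [(p, p)] else ivs)
    | none => none

-- result.extend(range(cur[0], cur[1] + 1))
def pvEmit (res : List Int) (cl ch : Int) : List Int := res ++ PySem.List.pyRange cl (ch + 1) 1

-- one iteration of B's merge sweep; state = (result, cur)
def pvMergeStep (st : List Int × Option (Int × Int)) (iv : Int × Int) :
    List Int × Option (Int × Int) :=
  match st.2 with
  | none => (st.1, some iv)
  | some (cl, ch) =>
    if iv.1 ≤ ch + 1 then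
      if iv.2 > ch then (st.1, some (cl, iv.2)) else st
    else (pvEmit st.1 cl ch, some iv)

-- the final 'if cur is not None: result.extend(...)'
def pvFinish (st : List Int × Option (Int × Int)) : List Int :=
  match st.2 with
  | some (cl, ch) => pvEmit st.1 cl ch
  | none => st.1

def parse_intervalos_alt (spec : String) : List Int :=
  match ((PySem.Str.split? spec ",").getD []).foldl
      (fun st parte => st.bind fun ivs => pvStepB ivs parte) (some []) with
  | some ivs =>
    pvFinish ((PySem.List.sorted ivs (fun iv => iv.1) false).foldl pvMergeStep ([], none))
  | none => []

-- ===== PRECONDITION & SPEC =====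
-- a comma piece is fine when, after strip, it is empty, or parses via int(), or (with '-') both halves parse
def pvPartOk (parte0 : String) : Bool :=
  let parte := PySem.Str.strip parte0
  if parte = "" then true
  else if PySem.Str.isIn "-" parte then
    match PySem.Str.splitMax? parte "-" 1 with
    | some [a, b] => (PySem.Int.ofStr? a).isSome && (PySem.Int.ofStr? b).isSome
    | _ => false
  else (PySem.Int.ofStr? parte).isSome

-- Pre_ excludes exactly the specs on which A's int() raises ValueError (B raises there too)
def Pre_parse_intervalos (spec : String) : Prop :=
  ∀ parte ∈ (PySem.Str.split? spec ",").getD [], pvPartOk parte = true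
instance (spec : String) : Decidable (Pre_parse_intervalos spec) := by
  unfold Pre_parse_intervalos; infer_instance

def pvWitness_parse_intervalos : String := "22,80,8000-8005"

def Spec_parse_intervalos (spec : String) (out : List Int) : Prop := out = parse_intervalos_alt spec
instance (spec : String) (out : List Int) : Decidable (Spec_parse_intervalos spec out) := by
  unfold Spec_parse_intervalos; infer_instance

-- ===== CLAIM (what is proved, stated in full; the proofs are below) =====
def Claim_equal_parse_intervalos : Prop := ∀ (spec : String), Dom_parse_intervalos spec → Pre_parse_intervalos spec → Spec_parse_intervalos spec (parse_intervalos spec)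

-- ===== LEMMAS AND PROOFS =====

-- p is covered by one of the intervals
def pvCov : List (Int × Int) → Int → Prop
  | [], _ => False
  | iv :: t, p => (iv.1 ≤ p ∧ p ≤ iv.2) ∨ pvCov t p

theorem pvCov_iff_exists (l : List (Int × Int)) (p : Int) :
    pvCov l p ↔ ∃ iv ∈ l, iv.1 ≤ p ∧ p ≤ iv.2 := by
  induction l with
  | nil => simp [pvCov]
  | cons iv t ih => simp [pvCov, ih]

-- invariant tying A's set to B's interval list
def pvRel (s : List Int) (ivs : List (Int × Int)) : Prop :=
  s.Nodup ∧ (∀ iv ∈ ivs, 1 ≤ iv.1 ∧ iv.1 ≤ iv.2 ∧ iv.2 ≤ 65535) ∧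
    ∀ p : Int, p ∈ s ↔ pvCov ivs p

theorem pv_foldl_add_mem (l : List Int) : ∀ (s : List Int) (p : Int),
    p ∈ l.foldl PySem.Set.add s ↔ p ∈ s ∨ p ∈ l := by
  induction l with
  | nil => intro s p; simp
  | cons x t ih =>
    intro s p
    rw [List.foldl_cons, ih, PySem.Set.mem_add]
    simp; tauto

theorem pv_foldl_add_nodup (l : List Int) : ∀ {s : List Int}, s.Nodup →
    (l.foldl PySem.Set.add s).Nodup := by
  induction l with
  | nil => intro s h; simpa using h
  | cons x t ih => intro s h; exact ih (PySem.Set.nodup_add s x h)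

theorem pvRel_single {s ivs} (h : pvRel s ivs) {p : Int} (h1 : 1 ≤ p) (h2 : p ≤ 65535) :
    pvRel (PySem.Set.add s p) (ivs ++ [(p, p)]) := by
  obtain ⟨hnd, hgood, hmem⟩ := h
  refine ⟨PySem.Set.nodup_add s p hnd, ?_, fun q => ?_⟩
  · intro iv hiv
    rcases List.mem_append.mp hiv with h | h
    · exact hgood iv h
    · simp at h; subst h; exact ⟨h1, le_refl _, h2⟩
  · rw [PySem.Set.mem_add, hmem, pvCov_iff_exists, pvCov_iff_exists]
    simp only [List.mem_append, List.mem_singleton]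
    constructor
    · rintro (⟨iv, hiv, hb⟩ | rfl)
      · exact ⟨iv, Or.inl hiv, hb⟩
      · exact ⟨(q, q), Or.inr rfl, le_refl _, le_refl _⟩
    · rintro ⟨iv, hiv | rfl, hb⟩
      · exact Or.inl ⟨iv, hiv, hb⟩
      · simp at hb; omega
  
theorem pvRel_range {s ivs} (h : pvRel s ivs) (ini fim : Int) :
    pvRel ((PySem.List.pyRange (max 1 ini) (min 65535 fim + 1) 1).foldl PySem.Set.add s)
      (if max 1 ini ≤ min 65535 fim then ivs ++ [(max 1 ini, min 65535 fim)] else ivs) := by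
  obtain ⟨hnd, hgood, hmem⟩ := h
  refine ⟨pv_foldl_add_nodup _ hnd, ?_, fun q => ?_⟩
  · intro iv hiv
    split at hiv
    · rcases List.mem_append.mp hiv with h | h
      · exact hgood iv h
      · simp at h; subst h; constructor <;> [omega; constructor <;> omega]
    · exact hgood iv hiv
  · rw [pv_foldl_add_mem, hmem, PySem.List.mem_pyRange_one]
    split
    · rw [pvCov_iff_exists, pvCov_iff_exists]
      simp only [List.mem_append, List.mem_singleton]
      constructor
      · rintro (⟨iv, hiv, hb⟩ | hb)
        · exact ⟨iv, Or.inl hiv, hb⟩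
        · exact ⟨_, Or.inr rfl, by omega, by omega⟩
      · rintro ⟨iv, hiv | rfl, hb⟩
        · exact Or.inl ⟨iv, hiv, hb⟩
        · simp at hb; omega
    · constructor
      · rintro (h | h)
        · exact h
        · omega
      · exact Or.inl

theorem pvStep_sync {s : List Int} {ivs : List (Int × Int)} (h : pvRel s ivs) (parte : String) :
    (pvStepA s parte = none ∧ pvStepB ivs parte = none) ∨
      (∃ s' ivs', pvStepA s parte = some s' ∧ pvStepB ivs parte = some ivs' ∧ pvRel s' ivs') := by
  rw [pvStepA, pvStepB]
  by_cases he : PySem.Str.strip parte = ""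
  · rw [if_pos he, if_pos he]
    exact Or.inr ⟨s, ivs, rfl, rfl, h⟩
  · rw [if_neg he, if_neg he]
    by_cases hd : PySem.Str.isIn "-" (PySem.Str.strip parte) = true
    · rw [if_pos hd, if_pos hd]
      match hsp : PySem.Str.splitMax? (PySem.Str.strip parte) "-" 1 with
      | none => exact Or.inl ⟨rfl, rfl⟩
      | some [] => exact Or.inl ⟨rfl, rfl⟩
      | some [a] => exact Or.inl ⟨rfl, rfl⟩
      | some (a :: b :: c :: t) => exact Or.inl ⟨rfl, rfl⟩
      | some [a, b] =>
        dsimp only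
        cases ha' : PySem.Int.ofStr? a with
        | none => exact Or.inl ⟨rfl, rfl⟩
        | some ini0 =>
          cases hb' : PySem.Int.ofStr? b with
          | none => exact Or.inl ⟨rfl, rfl⟩
          | some fim0 =>
            exact Or.inr ⟨_, _, rfl, rfl, pvRel_range h _ _⟩
    · rw [if_neg hd, if_neg hd]
      cases h1 : PySem.Int.ofStr? (PySem.Str.strip parte) with
      | none => exact Or.inl ⟨rfl, rfl⟩
      | some p =>
        refine Or.inr ⟨_, _, rfl, rfl, ?_⟩
        by_cases hp : 1 ≤ p ∧ p ≤ 65535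
        · simpa [hp] using pvRel_single h hp.1 hp.2
        · simpa [hp] using h

-- a bind-fold started at none stays none
theorem pvFold_none {α : Type} (f : α → String → Option α) (t : List String) :
    t.foldl (fun st parte => st.bind fun s => f s parte) none = none := by
  induction t with
  | nil => rfl
  | cons parte t ih => simpa using ih

-- the fold keeps the two Option states synchronized
theorem pvFold_sync (parts : List String) :
    ∀ {s : List Int} {ivs : List (Int × Int)}, pvRel s ivs →
      (parts.foldl (fun st parte => st.bind fun s => pvStepA s parte) (some s) = none ∧
       parts.foldl (fun st parte => st.bind fun a => pvStepB a parte) (some ivs) = none) ∨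
      (∃ s' ivs',
        parts.foldl (fun st parte => st.bind fun s => pvStepA s parte) (some s) = some s' ∧
        parts.foldl (fun st parte => st.bind fun a => pvStepB a parte) (some ivs) = some ivs' ∧
        pvRel s' ivs') := by
  induction parts with
  | nil => intro s ivs h; exact Or.inr ⟨s, ivs, rfl, rfl, h⟩
  | cons parte t ih =>
    intro s ivs h
    rcases pvStep_sync h parte with ⟨ha, hb⟩ | ⟨s', ivs', ha, hb, h'⟩
    · left
      rw [List.foldl_cons, List.foldl_cons, Option.bind_some, Option.bind_some, ha, hb]
      exact ⟨pvFold_none _ t, pvFold_none _ t⟩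
    · rw [List.foldl_cons, List.foldl_cons, Option.bind_some, Option.bind_some, ha, hb]
      exact ih h'

theorem pvRel_init : pvRel PySem.Set.empty [] :=
  ⟨List.nodup_nil, by simp, fun p => by simp [PySem.Set.empty, pvCov]⟩

-- the merge sweep: from a pending run (cl,ch), the finished output is strictly increasing and
-- contains exactly res ∪ [cl,ch] ∪ coverage of the remaining (start-sorted) intervals
theorem pvMerge_main (S : List (Int × Int)) :
    ∀ (res : List Int) (cl ch : Int),
      (∀ iv ∈ S, 1 ≤ iv.1 ∧ iv.1 ≤ iv.2 ∧ iv.2 ≤ 65535) →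
      S.Pairwise (fun a b => a.1 ≤ b.1) →
      (∀ iv ∈ S, cl ≤ iv.1) →
      res.Pairwise (· < ·) → (∀ x ∈ res, x < cl) → cl ≤ ch →
      (pvFinish (S.foldl pvMergeStep (res, some (cl, ch)))).Pairwise (· < ·) ∧
      ∀ p : Int, p ∈ pvFinish (S.foldl pvMergeStep (res, some (cl, ch))) ↔
        (p ∈ res ∨ (cl ≤ p ∧ p ≤ ch) ∨ pvCov S p) := by
  induction S with
  | nil =>
    intro res cl ch _ _ _ hres hlt hle
    constructor
    · rw [List.foldl_nil]
      show (pvEmit res cl ch).Pairwise (· < ·)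
      rw [pvEmit, List.pairwise_append]
      refine ⟨hres, PySem.List.pairwise_lt_pyRange_one _ _, fun x hx y hy => ?_⟩
      rw [PySem.List.mem_pyRange_one] at hy
      exact lt_of_lt_of_le (hlt x hx) hy.1
    · intro p
      rw [List.foldl_nil]
      show p ∈ pvEmit res cl ch ↔ _
      rw [pvEmit, List.mem_append, PySem.List.mem_pyRange_one]
      simp [pvCov]
  | cons iv rest ih =>
    intro res cl ch hgood hsorted hle hres hlt hcl
    rw [List.foldl_cons]
    have hgood' : ∀ iv' ∈ rest, 1 ≤ iv'.1 ∧ iv'.1 ≤ iv'.2 ∧ iv'.2 ≤ 65535 :=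
      fun iv' h' => hgood iv' (List.mem_cons_of_mem _ h')
    have hsorted' := (List.pairwise_cons.mp hsorted).2
    have hhead := (List.pairwise_cons.mp hsorted).1
    have hgiv := hgood iv (by simp)
    have hcliv := hle iv (by simp)
    show (pvFinish (rest.foldl pvMergeStep (pvMergeStep (res, some (cl, ch)) iv))).Pairwise _ ∧ _
    rw [pvMergeStep]
    dsimp only
    by_cases h1 : iv.1 ≤ ch + 1
    · rw [if_pos h1]
      by_cases h2 : iv.2 > ch
      · rw [if_pos h2]
        obtain ⟨hp, hm⟩ := ih res cl iv.2 hgood' hsorted'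
          (fun iv' h' => le_trans hcliv (hhead iv' h')) hres hlt (by omega)
        refine ⟨hp, fun p => ?_⟩
        rw [hm p]
        simp only [pvCov]
        constructor
        · rintro (h | h | h)
          · exact Or.inl h
          · by_cases hpc : p ≤ ch
            · exact Or.inr (Or.inl ⟨h.1, hpc⟩)
            · exact Or.inr (Or.inr (Or.inl ⟨by omega, h.2⟩))
          · exact Or.inr (Or.inr (Or.inr h))
        · rintro (h | h | h | h)
          · exact Or.inl h
          · exact Or.inr (Or.inl ⟨h.1, by omega⟩)
          · exact Or.inr (Or.inl ⟨by omega, h.2⟩)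
          · exact Or.inr (Or.inr h)
      · rw [if_neg h2]
        obtain ⟨hp, hm⟩ := ih res cl ch hgood' hsorted'
          (fun iv' h' => le_trans hcliv (hhead iv' h')) hres hlt hcl
        refine ⟨hp, fun p => ?_⟩
        rw [hm p]
        simp only [pvCov]
        constructor
        · rintro (h | h | h)
          · exact Or.inl h
          · exact Or.inr (Or.inl h)
          · exact Or.inr (Or.inr (Or.inr h))
        · rintro (h | h | h | h)
          · exact Or.inl h
          · exact Or.inr (Or.inl h)
          · exact Or.inr (Or.inl ⟨by omega, by omega⟩)
          · exact Or.inr (Or.inr h)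
    · rw [if_neg h1]
      have hresP : (pvEmit res cl ch).Pairwise (· < ·) := by
        rw [pvEmit, List.pairwise_append]
        refine ⟨hres, PySem.List.pairwise_lt_pyRange_one _ _, fun x hx y hy => ?_⟩
        rw [PySem.List.mem_pyRange_one] at hy
        exact lt_of_lt_of_le (hlt x hx) hy.1
      have hresLt : ∀ x ∈ pvEmit res cl ch, x < iv.1 := by
        intro x hx
        rcases List.mem_append.mp hx with h | h
        · exact lt_trans (hlt x h) (by omega)
        · rw [PySem.List.mem_pyRange_one] at h; omega
      obtain ⟨hp, hm⟩ := ih (pvEmit res cl ch) iv.1 iv.2 hgood' hsorted' hhead hresP hresLt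
        (by omega)
      refine ⟨hp, fun p => ?_⟩
      rw [hm p]
      rw [pvEmit, List.mem_append, PySem.List.mem_pyRange_one]
      simp only [pvCov]
      constructor
      · rintro ((h | h) | h | h)
        · exact Or.inl h
        · exact Or.inr (Or.inl ⟨h.1, by omega⟩)
        · exact Or.inr (Or.inr (Or.inl h))
        · exact Or.inr (Or.inr (Or.inr h))
      · rintro (h | h | h | h)
        · exact Or.inl (Or.inl h)
        · exact Or.inl (Or.inr ⟨h.1, by omega⟩)
        · exact Or.inr (Or.inl h)
        · exact Or.inr (Or.inr h)

-- a related final state: A's sort of the set equals B's sort-and-merge of the intervals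
theorem pvFinal {s : List Int} {ivs : List (Int × Int)} (h : pvRel s ivs) :
    PySem.List.sorted s (fun x => x) false
      = pvFinish ((PySem.List.sorted ivs (fun iv => iv.1) false).foldl pvMergeStep ([], none)) := by
  obtain ⟨hnd, hgood, hmem⟩ := h
  have hperm : (PySem.List.sorted ivs (fun iv => iv.1) false).Perm ivs :=
    PySem.List.sorted_perm _ _ _
  have hcov : ∀ p, pvCov (PySem.List.sorted ivs (fun iv => iv.1) false) p ↔ pvCov ivs p := by
    intro p
    rw [pvCov_iff_exists, pvCov_iff_exists]
    exact ⟨fun ⟨iv, h1, h2⟩ => ⟨iv, hperm.mem_iff.mp h1, h2⟩,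
           fun ⟨iv, h1, h2⟩ => ⟨iv, hperm.mem_iff.mpr h1, h2⟩⟩
  have hgoodS : ∀ iv ∈ PySem.List.sorted ivs (fun iv => iv.1) false,
      1 ≤ iv.1 ∧ iv.1 ≤ iv.2 ∧ iv.2 ≤ 65535 :=
    fun iv h' => hgood iv (hperm.mem_iff.mp h')
  have hsorted : (PySem.List.sorted ivs (fun iv => iv.1) false).Pairwise (fun a b => a.1 ≤ b.1) :=
    PySem.List.sorted_pairwise _ _
  cases hS : PySem.List.sorted ivs (fun iv => iv.1) false with
  | nil =>
    have hse : s = [] := by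
      apply List.eq_nil_iff_forall_not_mem.mpr
      intro p hp
      have := (hmem p).mp hp
      rw [← hcov p, hS] at this
      exact this
    subst hse
    rfl
  | cons iv rest =>
    rw [List.foldl_cons]
    have hstep : pvMergeStep ([], none) iv = ([], some iv) := rfl
    rw [hstep]
    rw [hS] at hgoodS hsorted hcov
    have hgiv := hgoodS iv (by simp)
    obtain ⟨hp, hm⟩ := pvMerge_main rest [] iv.1 iv.2
      (fun iv' h' => hgoodS iv' (List.mem_cons_of_mem _ h'))
      (List.pairwise_cons.mp hsorted).2 (List.pairwise_cons.mp hsorted).1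
      List.Pairwise.nil (by simp) hgiv.2.1
    apply PySem.List.sorted_eq_of_perm_of_pairwise_lt
    · rw [List.perm_ext_iff_of_nodup (hp.imp ne_of_lt) hnd]
      intro p
      rw [hm p, hmem p, ← hcov p]
      simp [pvCov]
    · exact hp

-- ===== VERDICT (by name: the statement is the Claim_ definition above) =====
theorem parse_intervalos_spec : Claim_equal_parse_intervalos := by
  intro spec _ _
  unfold Spec_parse_intervalos parse_intervalos parse_intervalos_alt
  rcases pvFold_sync ((PySem.Str.split? spec ",").getD []) pvRel_init with
    ⟨ha, hb⟩ | ⟨s', ivs', ha, hb, h'⟩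
  · rw [ha, hb]
  · rw [ha, hb]
    exact pvFinal h'
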